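-- pv_equiv track=rewrite | github.com/OscarDan-BV/3IV7_2024_Bautista_Velasquez_Oscar_Daniel | Python/05 Matrices/MatricesColumnas.py | sumar_matriz
-- ===== SOURCE A (Python) =====
-- def sumar_matriz(matriz1, matriz2, tamaño):
--     matriz_suma = []
--     for i in range(tamaño):
--         columna = []
--         for j in range(tamaño):
--             columna.append(matriz1[j][i] + matriz2[j][i])
--         matriz_suma.append(columna)
--     return matriz_suma
-- ===== SOURCE B (Python) =====
-- def sumar_matriz(matriz1, matriz2, tamaño):
--     # two passes: element-wise sum in natural row order, then an explicit transpose
--     S = [[matriz1[a][b] + matriz2[a][b] for b in range(tamaño)] for a in range(tamaño)]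
--     return [[S[j][i] for j in range(tamaño)] for i in range(tamaño)]
-- ===== Notes on version B (the rewrite author's own statement) =====
-- stated objective: alternative
-- what changed: Replaces A's single fused column-ordered walk (building each output column by indexing both inputs transposed) with two separate passes: a plain row-order element-wise sum followed by an explicit transpose.
import Mathlib
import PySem

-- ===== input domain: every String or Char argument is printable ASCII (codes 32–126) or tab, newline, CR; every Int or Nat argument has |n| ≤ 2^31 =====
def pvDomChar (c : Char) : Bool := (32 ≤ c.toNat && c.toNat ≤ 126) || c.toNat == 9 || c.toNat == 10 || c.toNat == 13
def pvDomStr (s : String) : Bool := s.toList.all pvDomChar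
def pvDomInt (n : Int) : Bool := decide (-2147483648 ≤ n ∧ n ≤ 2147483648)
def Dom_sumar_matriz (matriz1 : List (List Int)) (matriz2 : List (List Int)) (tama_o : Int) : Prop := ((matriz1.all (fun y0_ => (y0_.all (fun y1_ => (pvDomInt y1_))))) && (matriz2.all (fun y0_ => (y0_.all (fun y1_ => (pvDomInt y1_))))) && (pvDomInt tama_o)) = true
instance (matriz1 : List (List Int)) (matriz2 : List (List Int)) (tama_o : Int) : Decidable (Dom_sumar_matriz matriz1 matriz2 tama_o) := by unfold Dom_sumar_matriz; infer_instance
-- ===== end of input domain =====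

-- B replaces A's fused column-ordered walk by a row-order sum pass followed by an
-- explicit transpose pass (objective: alternative decomposition, same cost).

-- ===== PORT A =====
-- faithful fold over range(tamaño) twice, appending; matrix indexing via pyGetD
-- (in range under Pre_, where the Python does not raise)
def sumar_matriz (matriz1 : List (List Int)) (matriz2 : List (List Int)) (tama_o : Int) : List (List Int) :=
  (PySem.List.pyRange 0 tama_o 1).foldl (fun matriz_suma i =>
    matriz_suma ++ [ (PySem.List.pyRange 0 tama_o 1).foldl (fun columna j =>
      columna ++ [ PySem.List.pyGetD (PySem.List.pyGetD matriz1 j []) i 0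
                   + PySem.List.pyGetD (PySem.List.pyGetD matriz2 j []) i 0 ]) [] ]) []

-- ===== PORT B =====
def sumar_matriz_alt (matriz1 : List (List Int)) (matriz2 : List (List Int)) (tama_o : Int) : List (List Int) :=
  let S := (PySem.List.pyRange 0 tama_o 1).map (fun a =>
    (PySem.List.pyRange 0 tama_o 1).map (fun b =>
      PySem.List.pyGetD (PySem.List.pyGetD matriz1 a []) b 0
      + PySem.List.pyGetD (PySem.List.pyGetD matriz2 a []) b 0))
  (PySem.List.pyRange 0 tama_o 1).map (fun i =>
    (PySem.List.pyRange 0 tama_o 1).map (fun j =>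
      PySem.List.pyGetD (PySem.List.pyGetD S j []) i 0))

-- ===== PRECONDITION & SPEC =====
-- Pre_ excludes exactly the inputs on which the Python A raises IndexError:
-- some index pair (i,j) with 0 ≤ i,j < tamaño falls outside matriz1/matriz2 or their rows.
def Pre_sumar_matriz (matriz1 : List (List Int)) (matriz2 : List (List Int)) (tama_o : Int) : Prop :=
  tama_o ≤ 0 ∨
    (tama_o ≤ (matriz1.length : Int) ∧ tama_o ≤ (matriz2.length : Int) ∧
     (∀ row ∈ matriz1.take tama_o.toNat, tama_o ≤ (row.length : Int)) ∧
     (∀ row ∈ matriz2.take tama_o.toNat, tama_o ≤ (row.length : Int)))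
instance (matriz1 : List (List Int)) (matriz2 : List (List Int)) (tama_o : Int) : Decidable (Pre_sumar_matriz matriz1 matriz2 tama_o) := by unfold Pre_sumar_matriz; infer_instance

def pvWitness_sumar_matriz : List (List Int) × List (List Int) × Int :=
  ([[1, 2], [3, 4]], [[5, 6], [7, 8]], 2)

def Spec_sumar_matriz (matriz1 : List (List Int)) (matriz2 : List (List Int)) (tama_o : Int) (out : List (List Int)) : Prop := out = sumar_matriz_alt matriz1 matriz2 tama_o
instance (matriz1 : List (List Int)) (matriz2 : List (List Int)) (tama_o : Int) (out : List (List Int)) : Decidable (Spec_sumar_matriz matriz1 matriz2 tama_o out) := by unfold Spec_sumar_matriz; infer_instance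

-- ===== CLAIM (what is proved, stated in full; the proofs are below) =====
def Claim_equal_sumar_matriz : Prop := ∀ (matriz1 : List (List Int)) (matriz2 : List (List Int)) (tama_o : Int), Dom_sumar_matriz matriz1 matriz2 tama_o → Pre_sumar_matriz matriz1 matriz2 tama_o → Spec_sumar_matriz matriz1 matriz2 tama_o (sumar_matriz matriz1 matriz2 tama_o)

-- ===== LEMMAS AND PROOFS =====

-- an append-accumulating foldl is a map
theorem pv_foldl_append_map {α β : Type} (f : α → β) (l : List α) (acc : List β) :
    l.foldl (fun a x => a ++ [f x]) acc = acc ++ l.map f := by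
  induction l generalizing acc with
  | nil => simp
  | cons x xs ih => simp [List.foldl, ih]

-- ===== VERDICT (by name: the statement is the Claim_ definition above) =====
theorem sumar_matriz_spec : Claim_equal_sumar_matriz := by
  intro m1 m2 t _ _
  unfold Spec_sumar_matriz sumar_matriz sumar_matriz_alt
  rw [pv_foldl_append_map]
  simp only [List.nil_append]
  apply List.map_congr_left
  intro i hi
  rw [pv_foldl_append_map]
  simp only [List.nil_append]
  apply List.map_congr_left
  intro j hj
  rw [PySem.List.mem_pyRange_one] at hi hj
  rw [PySem.List.pyGetD_map_pyRange_of_nonneg _ _ _ _ hj.1 hj.2,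
      PySem.List.pyGetD_map_pyRange_of_nonneg _ _ _ _ hi.1 hi.2]
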